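-- pv_equiv track=rewrite | github.com/ndvzar/codewars | 5kyu/Double Cola.py | who_is_next
-- ===== SOURCE A (Python) =====
-- def who_is_next(names: list, r):
--     len_names = len(names)
--     if r <= len_names: return names[r-1]
--     n = 0
--     i = 0
--     while n * len_names <= r:
--         n += 2 ** i
--         i += 1
--     idx = (r - n*len_names)//2 **(i-1)
--     if (r - n*len_names) % 2 **(i-1) == 0:
--         return names[idx - 1]
--     else:
--         return names[idx]
-- ===== SOURCE B (Python) =====
-- def who_is_next(names: list, r):
--     len_names = len(names)
--     while r > len_names:
--         r = (r - len_names - 1) // 2 + 1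
--     return names[r - 1]
-- ===== Notes on version B (the rewrite author's own statement) =====
-- stated objective: simpler
-- what changed: Replaced A's exponential cumulative-sum loop plus floor-division/parity negative-index formula by a repeated reduction r <- (r-len-1)//2+1 that maps a position into the previous half-length round until r falls inside the name list.
-- crash fix: On r = (2^k-1)*len(names) for k >= 2 (the exact round boundaries) A raises IndexError from its off-by-one idx-1, while B returns the last drinker of the previous round, the intended answer. — e.g. on who_is_next(["a", "b"], 6): A raises IndexError, B returns "b"
import Mathlib
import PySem

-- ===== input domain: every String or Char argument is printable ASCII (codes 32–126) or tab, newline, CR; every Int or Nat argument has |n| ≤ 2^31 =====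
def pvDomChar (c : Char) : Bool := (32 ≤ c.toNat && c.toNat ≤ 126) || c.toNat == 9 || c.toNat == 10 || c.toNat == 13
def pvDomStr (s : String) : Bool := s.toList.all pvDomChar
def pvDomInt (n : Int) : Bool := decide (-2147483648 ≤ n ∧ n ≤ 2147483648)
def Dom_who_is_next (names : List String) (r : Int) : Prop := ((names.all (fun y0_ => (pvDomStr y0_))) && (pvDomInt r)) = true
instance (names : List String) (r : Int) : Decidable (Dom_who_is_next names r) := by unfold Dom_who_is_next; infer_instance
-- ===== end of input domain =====

-- B replaces A's exponential cumulative-sum loop and floor/parity negative-index formula by the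
-- simpler repeated reduction r <- (r-len-1)//2+1 into the previous half-length round (objective: simpler).

-- ===== PORT A =====
-- A's while loop 'while n*len <= r: n += 2**i; i += 1'; the '1 ≤ len' conjunct only makes the
-- recursion total in Lean (Python diverges for len ≤ 0 ≤ r, which Pre_ excludes).
def aLoop (len r n : Int) (i : Nat) : Int × Nat :=
  if h : 1 ≤ len ∧ n * len ≤ r then aLoop len r (n + 2 ^ i) (i + 1) else (n, i)
termination_by (r + 1 - n * len).toNat
decreasing_by
  have h1 := h.1
  have h2 := h.2
  have hp : (1 : Int) * 1 ≤ 2 ^ i * len :=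
    mul_le_mul (one_le_pow₀ (by norm_num)) h1 (by norm_num) (by positivity)
  have hexp : (n + 2 ^ i) * len = n * len + 2 ^ i * len := by ring
  rw [hexp]
  set A := n * len
  set B := (2 : Int) ^ i * len
  omega

def who_is_next (names : List String) (r : Int) : String :=
  let len_names : Int := names.length
  if r ≤ len_names then PySem.List.pyGetD names (r - 1) ""
  else
    let p := aLoop len_names r 0 0
    let idx := PySem.Int.floordiv (r - p.1 * len_names) (2 ^ (p.2 - 1))
    if PySem.Int.mod (r - p.1 * len_names) (2 ^ (p.2 - 1)) = 0 then
      PySem.List.pyGetD names (idx - 1) ""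
    else
      PySem.List.pyGetD names idx ""

-- ===== PORT B =====
-- B's while loop; again '1 ≤ len' only totalises what Python leaves undefined outside Pre_.
def bLoop (len r : Int) : Int :=
  if h : 1 ≤ len ∧ len < r then bLoop len (PySem.Int.floordiv (r - len - 1) 2 + 1) else r
termination_by (r - len).toNat
decreasing_by
  have h1 := h.1
  have h2 := h.2
  rw [PySem.Int.floordiv_eq_ediv_of_pos (by norm_num : (0:Int) < 2)]
  omega

def who_is_next_alt (names : List String) (r : Int) : String :=
  let len_names : Int := names.length
  let rr := bLoop len_names r
  PySem.List.pyGetD names (rr - 1) ""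

-- ===== PRECONDITION & SPEC =====
-- Pre_ excludes exactly the inputs where Python A does not return: empty names (the loop diverges or
-- names[r-1] raises), r ≤ -len (IndexError in the base branch), and the round boundaries
-- r = (2^k-1)*len, k ≥ 2, where A's idx-1 underflows to -len-1 (IndexError); within Dom (|r| ≤ 2^31)
-- only k ≤ 32 can occur, so the bound k ≤ 40 loses nothing.
def Pre_who_is_next (names : List String) (r : Int) : Prop :=
  names ≠ [] ∧ -(names.length : Int) < r ∧
    ∀ k ∈ Finset.Icc 2 40, r ≠ (2 ^ k - 1) * (names.length : Int)
instance (names : List String) (r : Int) : Decidable (Pre_who_is_next names r) := by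
  unfold Pre_who_is_next; infer_instance
def pvWitness_who_is_next : List String × Int := (["a", "b"], 5)

-- On r = (2^k-1)*len(names) for k ≥ 2 (the exact round boundaries) A raises IndexError from its
-- off-by-one idx-1, while B returns the last drinker of the previous round, the intended answer.
def Raises_who_is_next (names : List String) (r : Int) : Prop :=
  names ≠ [] ∧ ∃ k ∈ Finset.Icc 2 40, r = (2 ^ k - 1) * (names.length : Int)
instance (names : List String) (r : Int) : Decidable (Raises_who_is_next names r) := by
  unfold Raises_who_is_next; infer_instance
def pvRaiseWitness_who_is_next : List String × Int := (["a", "b"], 6)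
def pvRaiseWitnessOut_who_is_next : String := "b"

def Spec_who_is_next (names : List String) (r : Int) (out : String) : Prop := out = who_is_next_alt names r
instance (names : List String) (r : Int) (out : String) : Decidable (Spec_who_is_next names r out) := by unfold Spec_who_is_next; infer_instance

-- ===== CLAIM (what is proved, stated in full; the proofs are below) =====
def Claim_equal_who_is_next : Prop := ∀ (names : List String) (r : Int), Dom_who_is_next names r → Pre_who_is_next names r → Spec_who_is_next names r (who_is_next names r)
def Claim_raises_who_is_next : Prop := (∀ (names : List String) (r : Int), Dom_who_is_next names r → Raises_who_is_next names r → ¬ Pre_who_is_next names r) ∧ (Dom_who_is_next (pvRaiseWitness_who_is_next.1) (pvRaiseWitness_who_is_next.2) ∧ Raises_who_is_next (pvRaiseWitness_who_is_next.1) (pvRaiseWitness_who_is_next.2) ∧ who_is_next_alt (pvRaiseWitness_who_is_next.1) (pvRaiseWitness_who_is_next.2) = pvRaiseWitnessOut_who_is_next)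

-- ===== LEMMAS AND PROOFS =====

theorem aLoop_char (len r : Int) (hlen : 1 ≤ len) (M : Nat)
    (hM : r < (2 ^ M - 1) * len) (hmin : ∀ j, j < M → (2 ^ j - 1) * len ≤ r) :
    ∀ d j, M - j = d → j ≤ M → aLoop len r (2 ^ j - 1) j = (2 ^ M - 1, M) := by
  intro d
  induction d with
  | zero =>
    intro j hd hj
    have hjM : j = M := by omega
    subst hjM
    rw [aLoop, dif_neg]
    push_neg
    intro _
    omega
  | succ d ih =>
    intro j hd hj
    have hjM : j < M := by omega
    rw [aLoop, dif_pos ⟨hlen, hmin j hjM⟩]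
    have hpow : (2 : Int) ^ j - 1 + 2 ^ j = 2 ^ (j + 1) - 1 := by rw [pow_succ]; ring
    rw [hpow]
    exact ih (j + 1) (by omega) (by omega)

theorem bLoop_char (len : Int) (hlen : 1 ≤ len) :
    ∀ n : Nat, ∀ r : Int, r.toNat = n → 1 ≤ r → ∀ K : Nat,
      r ≤ (2 ^ (K + 1) - 1) * len → (∀ j : Nat, j < K → ¬ (r ≤ (2 ^ (j + 1) - 1) * len)) →
      bLoop len r = (r - 1 - (2 ^ K - 1) * len) / (2 ^ K) + 1 := by
  intro n
  induction n using Nat.strong_induction_on with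
  | _ n ih =>
    intro r hn hr K hK hKmin
    by_cases hbase : r ≤ len
    · -- the loop stops at once; K must be 0
      have hK0 : K = 0 := by
        by_contra hne
        exact hKmin 0 (by omega) (by simpa using le_trans hbase (by nlinarith))
      subst hK0
      rw [bLoop, dif_neg (by push_neg; intro _; omega)]
      simp
    · -- one reduction step
      push_neg at hbase
      have h2 : (0 : Int) < 2 := by norm_num
      rw [bLoop, dif_pos ⟨hlen, hbase⟩, PySem.Int.floordiv_eq_ediv_of_pos h2]
      set r' : Int := (r - len - 1) / 2 + 1 with hr'
      have hr'pos : 1 ≤ r' := by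
        have : 0 ≤ (r - len - 1) / 2 := Int.ediv_nonneg (by omega) (by omega)
        omega
      have hr'lt : r'.toNat < n := by omega
      -- K ≥ 1
      have hK1 : 1 ≤ K := by
        by_contra hne
        have hK0 : K = 0 := by omega
        subst hK0
        have : (2 : Int) ^ (0 + 1) - 1 = 1 := by norm_num
        rw [this, one_mul] at hK
        omega
      -- the step equivalence: r' ≤ (2^(j+1)-1)*len ↔ r ≤ (2^(j+2)-1)*len
      have hstep : ∀ j : Nat, (r' ≤ (2 ^ (j + 1) - 1) * len ↔ r ≤ (2 ^ (j + 2) - 1) * len) := by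
        intro j
        have hEF : (2 ^ (j + 2) - 1) * len = 2 * ((2 ^ (j + 1) - 1) * len) + len := by
          rw [pow_succ]; ring
        rw [hEF, hr']
        omega
      have hK' : r' ≤ (2 ^ ((K - 1) + 1) - 1) * len := by
        rw [hstep]
        have : K - 1 + 2 = K + 1 := by omega
        rw [this]; exact hK
      have hK'min : ∀ j : Nat, j < K - 1 → ¬ (r' ≤ (2 ^ (j + 1) - 1) * len) := by
        intro j hj
        rw [hstep]
        exact hKmin (j + 1) (by omega)
      have hrec := ih r'.toNat hr'lt r' rfl hr'pos (K - 1) hK' hK'min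
      rw [hrec]
      -- arithmetic: ((r-len-1)/2 + 1 - 1 - (2^(K-1)-1)*len) / 2^(K-1) = (r-1-(2^K-1)*len) / 2^K
      have hpowpos : (0 : Int) < 2 ^ (K - 1) := by positivity
      have hc : r' - 1 - (2 ^ (K - 1) - 1) * len = (r - 1 - (2 ^ K - 1) * len) / 2 := by
        have hK2 : (2 : Int) ^ K = 2 * 2 ^ (K - 1) := by
          conv_lhs => rw [show K = (K - 1) + 1 by omega]
          rw [pow_succ]; ring
        have : r - 1 - (2 ^ K - 1) * len = (r - len - 1) - 2 * ((2 ^ (K - 1) - 1) * len) := by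
          rw [hK2]; ring
        rw [this, hr']
        omega
      rw [hc, Int.ediv_ediv_of_nonneg (by norm_num : (0:Int) ≤ 2)]
      congr 2
      conv_rhs => rw [show K = (K - 1) + 1 by omega]
      rw [pow_succ]; ring

-- ===== VERDICT (by name: the statement is the Claim_ definition above) =====
theorem getElem_idx_congr {α : Type} (xs : List α) (i j : Nat) (h : i = j) (hi : i < xs.length) :
    xs[i] = xs[j]'(h ▸ hi) := by subst h; rfl

theorem pyGetD_shift (names : List String) (i : Int)
    (h1 : -(names.length : Int) ≤ i) (h2 : i < 0) :
    PySem.List.pyGetD names i "" = PySem.List.pyGetD names (i + names.length) "" := by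
  have hk : i = -(((-i).toNat : Nat) : Int) := by omega
  rw [hk, PySem.List.pyGetD_neg_natCast names (-i).toNat "" (by omega) (by omega),
      PySem.List.pyGetD_eq_getElem names "" (by omega) (by push_cast; omega)]
  exact getElem_idx_congr names _ _ (by omega) (by omega)

theorem who_is_next_spec : Claim_equal_who_is_next := by
  intro names r hdom hpre
  obtain ⟨hne, hlow, hbad⟩ := hpre
  have hrbound : r ≤ 2147483648 := by
    simp only [Dom_who_is_next, pvDomInt, Bool.and_eq_true, decide_eq_true_eq] at hdom
    exact hdom.2.2
  unfold Spec_who_is_next who_is_next who_is_next_alt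
  simp only []
  set L : Int := (names.length : Int) with hLdef
  have hL : 1 ≤ L := by
    have := List.length_pos_of_ne_nil hne
    omega
  by_cases hb : r ≤ L
  · -- base case: both sides are names[r-1]
    rw [if_pos hb, bLoop, dif_neg (by push_neg; intro _; omega)]
  · push_neg at hb
    have hr0 : 1 ≤ r := by omega
    -- r is never a round boundary (2^k - 1) * L
    have hnotb : ∀ k : Nat, 1 ≤ k → r ≠ (2 ^ k - 1) * L := by
      intro k hk heq
      by_cases hk1 : k = 1
      · subst hk1; norm_num at heq; omega
      by_cases hk40 : k ≤ 40
      · exact hbad k (Finset.mem_Icc.mpr ⟨by omega, by omega⟩) heq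
      · have h41 : (2 : Int) ^ 41 ≤ 2 ^ k := pow_le_pow_right₀ (by norm_num) (by omega)
        have hge : (2 : Int) ^ k - 1 ≤ (2 ^ k - 1) * L :=
          le_mul_of_one_le_right (by have : (1:Int) ≤ 2 ^ k := one_le_pow₀ (by norm_num); omega) hL
        have hval : (2 : Int) ^ 41 = 2199023255552 := by norm_num
        omega
    -- the enclosing-round exponent M found by A's loop
    have hex : ∃ m : Nat, r < (2 ^ m - 1) * L := by
      refine ⟨r.toNat + 2, ?_⟩
      have h1 : ((r.toNat + 2 : Nat) : Int) < 2 ^ (r.toNat + 2) := by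
        exact_mod_cast Nat.lt_two_pow_self
      have h2 : (2 : Int) ^ (r.toNat + 2) - 1 ≤ (2 ^ (r.toNat + 2) - 1) * L :=
        le_mul_of_one_le_right
          (by have : (1:Int) ≤ 2 ^ (r.toNat + 2) := one_le_pow₀ (by norm_num); omega) hL
      push_cast at h1
      omega
    set M : Nat := Nat.find hex with hMdef
    have hMlt : r < (2 ^ M - 1) * L := Nat.find_spec hex
    have hMmin : ∀ j : Nat, j < M → (2 ^ j - 1) * L ≤ r := by
      intro j hj
      have := Nat.find_min hex hj
      omega
    have hM2 : 2 ≤ M := by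
      rcases M with _ | _ | m
      · norm_num at hMlt; omega
      · norm_num at hMlt; omega
      · omega
    have haL : aLoop L r 0 0 = (2 ^ M - 1, M) := by
      have h0 : (2 : Int) ^ 0 - 1 = 0 := by norm_num
      have := aLoop_char L r hL M hMlt hMmin M 0 (by omega) (by omega)
      rwa [h0] at this
    rw [if_neg (by omega), haL]
    simp only []
    -- abbreviations
    set N : Int := 2 ^ (M - 1) with hNdef
    have hNsucc : (2 : Int) ^ M = 2 * N := by
      rw [hNdef]
      conv_lhs => rw [show M = (M - 1) + 1 by omega]
      rw [pow_succ]; ring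
    have hN2 : 2 ≤ N := by
      calc (2:Int) = 2 ^ 1 := by norm_num
        _ ≤ 2 ^ (M - 1) := pow_le_pow_right₀ (by norm_num) (by omega)
    set t : Int := r - (N - 1) * L with htdef
    have hsplit : (2 ^ M - 1) * L = (N - 1) * L + N * L := by rw [hNsucc]; ring
    have ht1 : 1 ≤ t := by
      have hle := hMmin (M - 1) (by omega)
      have hneq := hnotb (M - 1) (by omega)
      rw [← hNdef] at hle hneq
      omega
    have ht2 : t < N * L := by omega
    have hNpos : (0 : Int) < N := by omega
    rw [PySem.Int.mod_eq_emod_of_pos hNpos, PySem.Int.floordiv_eq_ediv_of_pos hNpos]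
    have hd : r - (2 ^ M - 1) * L = t - N * L := by omega
    rw [hd]
    have hmodeq : (t - N * L) % N = t % N := Int.sub_mul_emod_self_left t N L
    have hdivq : (t - N * L) / N = t / N - L := by
      have h := Int.add_mul_ediv_right t (-L) (show N ≠ 0 by omega)
      have he : t - N * L = t + -L * N := by ring
      rw [he, h]; ring
    set q : Int := t / N with hqdef
    set s : Int := t % N with hsdef
    have hts : N * q + s = t := Int.mul_ediv_add_emod t N
    have hs0 : 0 ≤ s := Int.emod_nonneg t (by omega)
    have hsN : s < N := Int.emod_lt_of_pos t hNpos
    have hq0 : 0 ≤ q := Int.ediv_nonneg (by omega) (by omega)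
    have hqL : q < L := by
      rw [hqdef, Int.ediv_lt_iff_lt_mul hNpos]
      calc t < N * L := ht2
        _ = L * N := by ring
    -- B's side: bLoop L r = (t - 1) / N + 1
    have hBloop : bLoop L r = (t - 1) / N + 1 := by
      have hKmin : ∀ j : Nat, j < M - 1 → ¬ (r ≤ (2 ^ (j + 1) - 1) * L) := by
        intro j hj
        push_neg
        have hle := hMmin (j + 1) (by omega)
        have hneq := hnotb (j + 1) (by omega)
        omega
      have hKle : r ≤ (2 ^ ((M - 1) + 1) - 1) * L := by
        rw [show (M - 1) + 1 = M by omega]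
        omega
      have h := bLoop_char L hL r.toNat r rfl hr0 (M - 1) hKle hKmin
      rw [← hNdef] at h
      rw [h]
      congr 2
      omega
    rw [hmodeq, hdivq, hBloop]
    by_cases hs : s = 0
    · -- divisible case: A takes names[q - L - 1], B takes names[q - 1]
      rw [if_pos hs]
      have hq1 : 1 ≤ q := by
        rcases lt_or_ge q 1 with h | h
        · exfalso
          have hq00 : q = 0 := by omega
          rw [hq00] at hts; omega
        · exact h
      have hexp1 : (q - 1) * N = N * q - N := by ring
      have htn : t - 1 = (N - 1) + (q - 1) * N := by omega
      have htdiv : (t - 1) / N = q - 1 := by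
        rw [htn, Int.add_mul_ediv_right _ _ (show N ≠ 0 by omega),
            Int.ediv_eq_zero_of_lt (by omega) (by omega)]
        ring
      rw [htdiv]
      have hshift := pyGetD_shift names (q - L - 1) (by omega) (by omega)
      rw [← hLdef] at hshift
      rw [hshift]
      congr 1
      omega
    · -- non-divisible case: A takes names[q - L], B takes names[q]
      rw [if_neg hs]
      have hexp2 : q * N = N * q := mul_comm q N
      have htn : t - 1 = (s - 1) + q * N := by omega
      have htdiv : (t - 1) / N = q := by
        rw [htn, Int.add_mul_ediv_right _ _ (show N ≠ 0 by omega),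
            Int.ediv_eq_zero_of_lt (by omega) (by omega)]
        ring
      rw [htdiv]
      have hshift := pyGetD_shift names (q - L) (by omega) (by omega)
      rw [← hLdef] at hshift
      rw [hshift]
      congr 1
      omega

theorem bLoop_2_6 : bLoop 2 6 = 2 := by
  rw [bLoop, dif_pos (by norm_num), PySem.Int.floordiv_eq_ediv_of_pos (by norm_num : (0:Int) < 2)]
  norm_num
  rw [bLoop, dif_neg (by norm_num)]

theorem who_is_next_raises : Claim_raises_who_is_next := by
  unfold Claim_raises_who_is_next
  constructor
  · rintro names r hdom ⟨hne, k, hk, heq⟩ ⟨_, _, hall⟩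
    exact hall k hk heq
  · refine ⟨by decide, by decide, ?_⟩
    show who_is_next_alt ["a", "b"] 6 = "b"
    unfold who_is_next_alt
    simp only [List.length_cons, List.length_nil]
    norm_num [bLoop_2_6]
    decide

-- self-check: the raise witness (["a","b"], 6) indeed falls outside Pre_who_is_next
theorem pvRaiseWitness_outside_Pre_ok : ¬ Pre_who_is_next ["a", "b"] 6 :=
  who_is_next_raises.1 ["a", "b"] 6 (by decide) (by decide)
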